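-- pv_equiv track=rewrite | github.com/Lungsangg/levelpack-UI | level_packs/convert2plaintxt.py | separate_tables
-- ===== SOURCE A (Python) =====
-- def separate_tables(string):
--     chunks = []
--     lines = string.split('\n')
--     non_table = []
--     table = []
--     for line in lines:
--         if line.startswith('+') or line.startswith('|'):
--             # add non-table
--             if non_table:
--                 chunks.append(('non_table', non_table))
--                 non_table = []
--
--             table.append(line)
--         else:
--             if table:
--                 chunks.append(('table', table))
--                 table = []
--             non_table.append(line)
--     if non_table:
--         chunks.append(('non_table', non_table))
--     if table:
--         chunks.append(('table', table))
--     return chunks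
-- ===== SOURCE B (Python) =====
-- def separate_tables(string):
--     def kind(line):
--         return 'table' if line.startswith(('+', '|')) else 'non_table'
--
--     lines = string.split('\n')
--     chunks = []
--     i, n = 0, len(lines)
--     while i < n:
--         k = kind(lines[i])
--         j = i + 1
--         while j < n and kind(lines[j]) == k:
--             j += 1
--         chunks.append((k, lines[i:j]))
--         i = j
--     return chunks
-- ===== Notes on version B (the rewrite author's own statement) =====
-- stated objective: alternative
-- what changed: Replaced A's two-accumulator flush-on-switch state machine (separate table/non_table buffers flushed when the line kind changes plus two trailing flushes) with a single span scan that finds each maximal run of same-kind lines with two indices and emits it directly.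
import Mathlib
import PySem

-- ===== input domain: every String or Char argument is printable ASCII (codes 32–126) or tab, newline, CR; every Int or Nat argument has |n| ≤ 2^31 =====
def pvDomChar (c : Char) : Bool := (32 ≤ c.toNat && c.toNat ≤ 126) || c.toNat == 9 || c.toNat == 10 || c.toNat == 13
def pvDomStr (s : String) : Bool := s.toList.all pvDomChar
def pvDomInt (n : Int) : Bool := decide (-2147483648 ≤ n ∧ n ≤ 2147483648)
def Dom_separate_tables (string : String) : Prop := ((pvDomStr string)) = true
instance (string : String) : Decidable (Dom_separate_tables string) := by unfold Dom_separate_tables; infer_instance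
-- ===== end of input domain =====

-- B replaces A's two-accumulator flush-on-switch state machine with a span scan that
-- emits each maximal run of same-kind lines directly (objective: alternative decomposition).


-- ===== PORT A =====
-- one loop step: flush the opposite accumulator on a kind switch, extend the matching one
def aStep (st : List (String × List String) × List String × List String) (line : String) :
    List (String × List String) × List String × List String :=
  match st with
  | (chunks, non_table, table) =>
    if PySem.Str.startswith line "+" || PySem.Str.startswith line "|" then
      if non_table ≠ [] then (chunks ++ [("non_table", non_table)], [], table ++ [line])
      else (chunks, non_table, table ++ [line])
    else
      if table ≠ [] then (chunks ++ [("table", table)], non_table ++ [line], [])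
      else (chunks, non_table ++ [line], table)

-- the two trailing flushes after the loop
def aFinish (st : List (String × List String) × List String × List String) :
    List (String × List String) :=
  match st with
  | (chunks, non_table, table) =>
    let chunks := if non_table ≠ [] then chunks ++ [("non_table", non_table)] else chunks
    if table ≠ [] then chunks ++ [("table", table)] else chunks

def separate_tables (string : String) : List (String × List String) :=
  aFinish (((PySem.Str.split? string "\n").getD []).foldl aStep ([], [], []))

-- ===== PORT B =====
def altKind (line : String) : String :=
  if PySem.Str.startswith line "+" || PySem.Str.startswith line "|" then "table" else "non_table"

-- outer while loop of B: take the maximal same-kind run starting at the current position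
def altGo : List String → List (String × List String)
  | [] => []
  | l :: ls =>
      (altKind l, l :: ls.takeWhile (fun x => altKind x == altKind l)) ::
        altGo (ls.dropWhile (fun x => altKind x == altKind l))
termination_by ls => ls.length
decreasing_by
  exact Nat.lt_succ_of_le (List.length_dropWhile_le _ _)

def separate_tables_alt (string : String) : List (String × List String) :=
  altGo ((PySem.Str.split? string "\n").getD [])

-- ===== PRECONDITION & SPEC =====
def Spec_separate_tables (string : String) (out : List (String × List String)) : Prop := out = separate_tables_alt string
instance (string : String) (out : List (String × List String)) : Decidable (Spec_separate_tables string out) := by unfold Spec_separate_tables; infer_instance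

-- ===== CLAIM (what is proved, stated in full; the proofs are below) =====
def Claim_equal_separate_tables : Prop := ∀ (string : String), Dom_separate_tables string → Spec_separate_tables string (separate_tables string)

-- ===== LEMMAS AND PROOFS =====

-- prepend a pending run of kind `k` onto a grouped list (merging with a matching head group)
def pend (k : String) (run : List String) (g : List (String × List String)) :
    List (String × List String) :=
  if run = [] then g
  else
    match g with
    | [] => [(k, run)]
    | (k', r) :: rest => if k' = k then (k, run ++ r) :: rest else (k, run) :: ((k', r) :: rest)

lemma pend_nil (k : String) (g : List (String × List String)) : pend k [] g = g := by
  simp [pend]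

lemma altGo_nil : altGo [] = [] := by rw [altGo]

lemma altGo_cons (l : String) (ls : List String) :
    altGo (l :: ls) =
      (altKind l, l :: ls.takeWhile (fun x => altKind x == altKind l)) ::
        altGo (ls.dropWhile (fun x => altKind x == altKind l)) := by
  rw [altGo]

lemma altKind_cases (l : String) : altKind l = "table" ∨ altKind l = "non_table" := by
  unfold altKind; split <;> simp

lemma aStep_of_table (line : String) (h : altKind line = "table")
    (chunks : List (String × List String)) (nt t : List String) :
    aStep (chunks, nt, t) line =
      if nt ≠ [] then (chunks ++ [("non_table", nt)], [], t ++ [line])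
      else (chunks, nt, t ++ [line]) := by
  unfold altKind at h
  unfold aStep
  split at h
  · next hc => simp only [hc, if_true]
  · next hc => exact absurd h (by decide)

lemma aStep_of_nontable (line : String) (h : altKind line = "non_table")
    (chunks : List (String × List String)) (nt t : List String) :
    aStep (chunks, nt, t) line =
      if t ≠ [] then (chunks ++ [("table", t)], nt ++ [line], [])
      else (chunks, nt ++ [line], t) := by
  unfold altKind at h
  unfold aStep
  split at h
  · next hc => exact absurd h.symm (by decide)
  · next hc => simp only [hc, Bool.false_eq_true, if_false]

lemma pend_snoc (k l : String) (t : List String) (ls : List String) (hk : altKind l = k) :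
    pend k (t ++ [l]) (altGo ls) = pend k t (altGo (l :: ls)) := by
  subst hk
  cases ls with
  | nil =>
      rw [altGo_cons, altGo_nil]
      simp only [List.takeWhile_nil, List.dropWhile_nil, altGo_nil]
      rcases eq_or_ne t [] with h | h
      · subst h; simp [pend]
      · simp [pend, h]
  | cons l' ls' =>
      rw [altGo_cons l (l' :: ls'), altGo_cons l' ls']
      by_cases hb : altKind l' = altKind l
      · simp only [hb, List.takeWhile_cons, List.dropWhile_cons, beq_self_eq_true, if_true]
        rcases eq_or_ne t [] with h | h
        · subst h; simp [pend]
        · simp [pend, h]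
      · have hb' : (altKind l' == altKind l) = false := by simp [hb]
        simp only [List.takeWhile_cons, List.dropWhile_cons, hb', Bool.false_eq_true, if_false]
        rw [altGo_cons l' ls']
        rcases eq_or_ne t [] with h | h
        · subst h; simp [pend, hb]
        · simp [pend, hb, h]

lemma pend_head_ne (k k' : String) (run r : List String) (rest : List (String × List String))
    (hrun : run ≠ []) (hne : k' ≠ k) :
    pend k run ((k', r) :: rest) = (k, run) :: (k', r) :: rest := by
  simp [pend, hrun, hne]

lemma fold_pend : ∀ (lines : List String) (chunks : List (String × List String))
    (nt t : List String), nt = [] ∨ t = [] →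
    aFinish (lines.foldl aStep (chunks, nt, t)) =
      chunks ++ pend "non_table" nt (pend "table" t (altGo lines)) := by
  intro lines
  induction lines with
  | nil =>
      intro chunks nt t hinv
      rw [altGo_nil]
      rcases hinv with h | h <;> subst h <;> simp [aFinish, pend] <;> split_ifs <;> simp_all
  | cons l ls ih =>
      intro chunks nt t hinv
      rw [List.foldl_cons]
      rcases altKind_cases l with hk | hk
      · by_cases hnt : nt = []
        · subst hnt
          rw [aStep_of_table l hk, if_neg (by simp), ih chunks [] (t ++ [l]) (Or.inl rfl),
            pend_snoc _ _ _ _ hk]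
        · have ht : t = [] := by rcases hinv with h | h; exact absurd h hnt; exact h
          subst ht
          rw [aStep_of_table l hk, if_pos hnt]
          simp only [List.nil_append]
          rw [ih (chunks ++ [("non_table", nt)]) [] [l] (Or.inl rfl), pend_nil]
          have h1 : pend "table" [l] (altGo ls) = altGo (l :: ls) := by
            have := pend_snoc "table" l [] ls hk
            simpa [pend_nil] using this
          rw [h1, pend_nil, altGo_cons l ls, hk,
            pend_head_ne _ _ _ _ _ hnt (by decide)]
          simp
      · by_cases ht : t = []
        · subst ht
          rw [aStep_of_nontable l hk, if_neg (by simp), ih chunks (nt ++ [l]) [] (Or.inr rfl),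
            pend_nil, pend_nil, pend_snoc _ _ _ _ hk]
        · have hnt : nt = [] := by rcases hinv with h | h; exact h; exact absurd h ht
          subst hnt
          rw [aStep_of_nontable l hk, if_pos ht]
          simp only [List.nil_append]
          rw [ih (chunks ++ [("table", t)]) [l] [] (Or.inr rfl), pend_nil]
          have h1 : pend "non_table" [l] (altGo ls) = altGo (l :: ls) := by
            have := pend_snoc "non_table" l [] ls hk
            simpa [pend_nil] using this
          rw [h1, pend_nil, altGo_cons l ls, hk,
            pend_head_ne _ _ _ _ _ ht (by decide)]
          simp

-- ===== VERDICT (by name: the statement is the Claim_ definition above) =====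
theorem separate_tables_spec : Claim_equal_separate_tables := by
  intro s _
  unfold Spec_separate_tables separate_tables separate_tables_alt
  rw [fold_pend _ [] [] [] (Or.inl rfl)]
  simp [pend_nil]
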